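-- pv_equiv track=rewrite | github.com/Eurydia/practice-python | codeforces/1886/1886A.py | solve
-- ===== SOURCE A (Python) =====
-- from typing import List
--
-- def solve(n: int) -> List[int]:
--     for x in range(1, n + 1):
--         if x % 3 == 0:
--             continue
--         for y in range(2, n - x + 1):
--             if y % 3 == 0:
--                 continue
--
--             if x == y:
--                 continue
--
--             z: int = n - x - y
--             if z % 3 == 0:
--                 continue
--
--             if z in (x, y):
--                 continue
--
--             return [x, y, z]
--     return [-1, -1, -1]
-- ===== SOURCE B (Python) =====
-- from typing import List
--
-- def solve(n: int) -> List[int]: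
--     if n % 3 != 0:
--         return [1, 2, n - 3] if n >= 7 else [-1, -1, -1]
--     return [1, 4, n - 5] if n >= 12 else [-1, -1, -1]
-- ===== Notes on version B (the rewrite author's own statement) =====
-- stated objective: simpler
-- what changed: Replaced the nested loop-and-filter scan with a closed-form case analysis on the residue of n modulo 3: the first triple A's scan ever finds is [1, 2, n-3] (residue nonzero, n >= 7) or [1, 4, n-5] (residue zero, n >= 12), otherwise [-1, -1, -1].
import Mathlib
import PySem

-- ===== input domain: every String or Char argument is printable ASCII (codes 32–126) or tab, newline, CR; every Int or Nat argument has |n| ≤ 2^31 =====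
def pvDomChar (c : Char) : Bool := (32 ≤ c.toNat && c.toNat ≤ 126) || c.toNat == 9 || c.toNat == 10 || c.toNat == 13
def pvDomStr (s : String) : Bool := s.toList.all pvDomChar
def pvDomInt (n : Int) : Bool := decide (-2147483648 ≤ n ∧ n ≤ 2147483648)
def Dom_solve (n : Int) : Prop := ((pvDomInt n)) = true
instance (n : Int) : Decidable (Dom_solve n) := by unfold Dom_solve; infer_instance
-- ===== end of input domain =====

-- B replaces A's nested scan with a closed-form case analysis on the residue of n modulo 3 (simpler).
-- ===== PORT A =====
-- inner for-loop over y = 2 .. n-x (fuel = number of remaining iterations); 'continue' = recurse, 'return' = some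
def innerLoop (n x y : Int) (fuel : Nat) : Option (List Int) :=
  match fuel with
  | 0 => none
  | Nat.succ f =>
    if PySem.Int.mod y 3 = 0 then innerLoop n x (y + 1) f
    else if x = y then innerLoop n x (y + 1) f
    else
      let z := n - x - y
      if PySem.Int.mod z 3 = 0 then innerLoop n x (y + 1) f
      else if z = x ∨ z = y then innerLoop n x (y + 1) f
      else some [x, y, z]

-- outer for-loop over x = 1 .. n
def outerLoop (n x : Int) (fuel : Nat) : Option (List Int) :=
  match fuel with
  | 0 => none
  | Nat.succ f =>
    if PySem.Int.mod x 3 = 0 then outerLoop n (x + 1) f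
    else
      match innerLoop n x 2 (n - x + 1 - 2).toNat with
      | some r => some r
      | none => outerLoop n (x + 1) f

def solve (n : Int) : List Int :=
  match outerLoop n 1 (n + 1 - 1).toNat with
  | some r => r
  | none => [-1, -1, -1]

-- ===== PORT B =====
def solve_alt (n : Int) : List Int :=
  if PySem.Int.mod n 3 ≠ 0 then
    if n ≥ 7 then [1, 2, n - 3] else [-1, -1, -1]
  else
    if n ≥ 12 then [1, 4, n - 5] else [-1, -1, -1]

-- ===== PRECONDITION & SPEC =====
def Spec_solve (n : Int) (out : List Int) : Prop := out = solve_alt n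
instance (n : Int) (out : List Int) : Decidable (Spec_solve n out) := by unfold Spec_solve; infer_instance

-- ===== CLAIM (what is proved, stated in full; the proofs are below) =====
def Claim_equal_solve : Prop := ∀ (n : Int), Dom_solve n → Spec_solve n (solve n)

-- ===== LEMMAS AND PROOFS =====

-- ===== VERDICT (by name: the statement is the Claim_ definition above) =====
theorem mod3 (a : Int) : PySem.Int.mod a 3 = a % 3 :=
  PySem.Int.mod_eq_emod_of_pos (by norm_num)

theorem solve_big_nonmult (n : Int) (h7 : 7 ≤ n) (hmod : n % 3 ≠ 0) :
    solve n = [1, 2, n - 3] := by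
  obtain ⟨f, hf⟩ : ∃ f, (n + 1 - 1).toNat = f + 1 := ⟨(n - 1).toNat, by omega⟩
  obtain ⟨g, hg⟩ : ∃ g, (n - 1 + 1 - 2).toNat = g + 1 := ⟨(n - 3).toNat, by omega⟩
  have hz : ¬ (n - 1 - 2) % 3 = 0 := by omega
  have hne : ¬ (n - 1 - 2 = 1 ∨ n - 1 - 2 = 2) := by omega
  simp only [solve, hf, hg, outerLoop, innerLoop, mod3, hz, hne]
  norm_num
  omega

theorem solve_big_mult (n : Int) (h12 : 12 ≤ n) (hmod : n % 3 = 0) :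
    solve n = [1, 4, n - 5] := by
  obtain ⟨f, hf⟩ : ∃ f, (n + 1 - 1).toNat = f + 1 := ⟨(n - 1).toNat, by omega⟩
  obtain ⟨g, hg⟩ : ∃ g, (n - 1 + 1 - 2).toNat = g + 3 := ⟨(n - 5).toNat, by omega⟩
  have hz2 : (n - 1 - 2) % 3 = 0 := by omega
  have hz4 : ¬ (n - 1 - 4) % 3 = 0 := by omega
  have hne : ¬ (n - 1 - 4 = 1 ∨ n - 1 - 4 = 4) := by omega
  simp only [solve, hf, hg, outerLoop, innerLoop, mod3, hz2]
  norm_num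
  have hd4 : ¬ (3 ∣ (n - 1 - 4)) := by omega
  simp [hd4, hne]
  omega

theorem solve_alt_eval (n : Int) :
    solve_alt n = if n % 3 ≠ 0 then (if n ≥ 7 then [1, 2, n - 3] else [-1, -1, -1])
                  else (if n ≥ 12 then [1, 4, n - 5] else [-1, -1, -1]) := by
  simp only [solve_alt, mod3]

theorem solve_spec : Claim_equal_solve := by
  intro n _
  unfold Spec_solve
  rw [solve_alt_eval]
  by_cases hm : n % 3 = 0
  · by_cases h12 : 12 ≤ n
    · rw [solve_big_mult n h12 hm]
      simp [hm, h12]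
    · by_cases hp : 1 ≤ n
      · interval_cases n <;> decide
      · have h0 : (n + 1 - 1).toNat = 0 := by omega
        simp only [solve, h0, outerLoop]
        split_ifs <;> first | rfl | omega
  · by_cases h7 : 7 ≤ n
    · rw [solve_big_nonmult n h7 hm]
      simp [hm, h7]
    · by_cases hp : 1 ≤ n
      · interval_cases n <;> decide
      · have h0 : (n + 1 - 1).toNat = 0 := by omega
        simp only [solve, h0, outerLoop]
        split_ifs <;> first | rfl | omega
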